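-- pv_equiv track=rewrite | github.com/dimawestcoast/python-selenium-automation | algorithms/hw4_algorithms.py | sum_even_and_product_odd
-- ===== SOURCE A (Python) =====
-- def sum_even_and_product_odd(arr: list):
--     # Initialize variables for the sum of even numbers and the product of odd numbers
--     sum_even = 0
--     product_odd = 1
--
--     for number in arr:
--         if number % 2 == 0:
--             sum_even += number
--         else:
--             product_odd *= number
--
--     return [sum_even, product_odd]
-- ===== SOURCE B (Python) =====
-- def sum_even_and_product_odd(arr: list):
--     # Divide and conquer: combine (even_sum, odd_product) of the two halves.
--     def go(lo, hi):
--         if hi - lo == 1: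
--             n = arr[lo]
--             return (n, 1) if n % 2 == 0 else (0, n)
--         mid = (lo + hi) // 2
--         s1, p1 = go(lo, mid)
--         s2, p2 = go(mid, hi)
--         return (s1 + s2, p1 * p2)
--
--     if not arr:
--         return [0, 1]
--     s, p = go(0, len(arr))
--     return [s, p]
-- ===== Notes on version B (the rewrite author's own statement) =====
-- stated objective: alternative
-- what changed: Replaces the linear accumulator loop with a divide-and-conquer recursion that splits the array in halves and merges (even_sum, odd_product) pairs by (s1+s2, p1*p2), correct by associativity of + and *.
import Mathlib
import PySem

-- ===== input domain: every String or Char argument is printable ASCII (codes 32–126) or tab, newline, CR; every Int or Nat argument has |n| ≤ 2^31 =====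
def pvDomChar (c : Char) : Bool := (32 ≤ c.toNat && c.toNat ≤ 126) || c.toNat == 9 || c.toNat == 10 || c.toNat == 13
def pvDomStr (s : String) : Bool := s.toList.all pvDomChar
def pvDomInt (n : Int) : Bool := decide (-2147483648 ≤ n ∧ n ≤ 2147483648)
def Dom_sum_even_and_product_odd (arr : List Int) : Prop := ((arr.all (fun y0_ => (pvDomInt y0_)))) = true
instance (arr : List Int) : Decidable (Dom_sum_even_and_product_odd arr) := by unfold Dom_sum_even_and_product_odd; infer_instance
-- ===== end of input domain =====

-- B replaces A's linear accumulator loop by a divide-and-conquer recursion merging (even_sum, odd_product) halves; alternative decomposition, same cost.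
-- ===== PORT A =====
def sum_even_and_product_odd (arr : List Int) : List Int :=
  let st := arr.foldl (fun (st : Int × Int) number =>
    if PySem.Int.mod number 2 = 0 then (st.1 + number, st.2) else (st.1, st.2 * number))
    (0, 1)
  [st.1, st.2]

-- ===== PORT B =====
-- go(lo, hi) on index ranges is ported as recursion on the sublist arr[lo:hi];
-- Python's mid = (lo+hi)//2 splits that sublist at length/2 (take/drop).
-- The `length ≤ 1` guard only adds a value on [], which Python's go is never called on.
def sepoGo (l : List Int) : Int × Int :=
  if h : l.length ≤ 1 then
    match l with
    | [n] => if PySem.Int.mod n 2 = 0 then (n, 1) else (0, n)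
    | _ => (0, 1)
  else
    let mid := l.length / 2
    let r1 := sepoGo (l.take mid)
    let r2 := sepoGo (l.drop mid)
    (r1.1 + r2.1, r1.2 * r2.2)
termination_by l.length
decreasing_by
  · simp [List.length_take]; omega
  · simp [List.length_drop]; omega

def sum_even_and_product_odd_alt (arr : List Int) : List Int :=
  if arr = [] then [0, 1]
  else
    let st := sepoGo arr
    [st.1, st.2]

-- ===== PRECONDITION & SPEC =====
def Spec_sum_even_and_product_odd (arr : List Int) (out : List Int) : Prop := out = sum_even_and_product_odd_alt arr
instance (arr : List Int) (out : List Int) : Decidable (Spec_sum_even_and_product_odd arr out) := by unfold Spec_sum_even_and_product_odd; infer_instance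

-- ===== CLAIM (what is proved, stated in full; the proofs are below) =====
def Claim_equal_sum_even_and_product_odd : Prop := ∀ (arr : List Int), Dom_sum_even_and_product_odd arr → Spec_sum_even_and_product_odd arr (sum_even_and_product_odd arr)

-- ===== LEMMAS AND PROOFS =====
lemma sepoGo_eq_aux (n : Nat) : ∀ l : List Int, l.length = n →
    sepoGo l = ((l.filter (fun m => PySem.Int.mod m 2 = 0)).sum,
                (l.filter (fun m => ¬ PySem.Int.mod m 2 = 0)).prod) := by
  induction n using Nat.strong_induction_on with
  | _ n ih =>
    intro l hl
    rw [sepoGo]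
    by_cases h : l.length ≤ 1
    · rw [dif_pos h]
      match l with
      | [] => simp
      | [m] =>
        show (if PySem.Int.mod m 2 = 0 then ((m, 1) : Int × Int) else (0, m)) = _
        by_cases hm : PySem.Int.mod m 2 = 0
        · rw [if_pos hm]
          simp only [List.filter_cons, List.filter_nil, hm, decide_true, decide_not,
            Bool.not_true, if_true, Bool.false_eq_true, if_false, List.sum_cons, List.sum_nil,
            List.prod_nil, add_zero]
        · rw [if_neg hm]
          simp only [List.filter_cons, List.filter_nil, hm, decide_false, decide_not,
            Bool.not_false, if_true, Bool.false_eq_true, if_false, List.sum_nil, List.prod_cons,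
            List.prod_nil, mul_one]
      | a :: b :: t => simp at h
    · rw [dif_neg h]
      have h1 := ih (l.take (l.length / 2)).length (by simp; omega) _ rfl
      have h2 := ih (l.drop (l.length / 2)).length (by simp; omega) _ rfl
      simp only [h1, h2]
      have hsplit : l = l.take (l.length / 2) ++ l.drop (l.length / 2) :=
        (List.take_append_drop _ _).symm
      conv_rhs => rw [hsplit]
      rw [List.filter_append, List.filter_append, List.sum_append, List.prod_append]

lemma sepoGo_eq (l : List Int) :
    sepoGo l = ((l.filter (fun m => PySem.Int.mod m 2 = 0)).sum,
                (l.filter (fun m => ¬ PySem.Int.mod m 2 = 0)).prod) :=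
  sepoGo_eq_aux l.length l rfl

lemma sepo_loop (arr : List Int) (s p : Int) :
    arr.foldl (fun (st : Int × Int) number =>
      if PySem.Int.mod number 2 = 0 then (st.1 + number, st.2) else (st.1, st.2 * number))
      (s, p)
    = (s + (arr.filter (fun n => PySem.Int.mod n 2 = 0)).sum,
       p * (arr.filter (fun n => ¬ PySem.Int.mod n 2 = 0)).prod) := by
  induction arr generalizing s p with
  | nil => simp
  | cons x xs ih =>
    simp only [List.foldl_cons, List.filter_cons]
    by_cases h : PySem.Int.mod x 2 = 0 <;>
      simp only [h, decide_true, decide_false, decide_not, not_true, not_false_iff, ih] <;>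
      simp [Prod.ext_iff] <;> ring

-- ===== VERDICT (by name: the statement is the Claim_ definition above) =====
theorem sum_even_and_product_odd_spec : Claim_equal_sum_even_and_product_odd := by
  intro arr _
  unfold Spec_sum_even_and_product_odd sum_even_and_product_odd sum_even_and_product_odd_alt
  rw [sepo_loop]
  by_cases he : arr = []
  · subst he; simp
  · simp only [if_neg he, sepoGo_eq]
    simp
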